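-- pv_equiv track=rewrite | github.com/tarunspandit/Imersa | BridgeEmulator/lights/protocols/lifx.py | _reorient_tile_colors
-- ===== SOURCE A (Python) =====
-- from typing import Dict, List, Tuple, Optional, Any
--
-- def _reorient_tile_colors(colors: List[Tuple[int, int, int, int]],
--                          width: int, height: int, orientation: str) -> List[Tuple[int, int, int, int]]:
--     """Reorient color array based on tile orientation"""
--     if orientation == "RightSideUp":
--         # No change needed
--         return colors
--
--     # Convert to 2D array for easier manipulation
--     grid = []
--     for y in range(height):
--         row = []
--         for x in range(width):
--             row.append(colors[y * width + x])
--         grid.append(row)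
--
--     # Apply rotation based on orientation
--     if orientation == "UpsideDown":
--         # Rotate 180 degrees
--         grid = [row[::-1] for row in grid[::-1]]
--     elif orientation == "RotatedLeft":
--         # Rotate 90 degrees counter-clockwise
--         grid = [[grid[y][x] for y in range(height)] for x in range(width-1, -1, -1)]
--     elif orientation == "RotatedRight":
--         # Rotate 90 degrees clockwise
--         grid = [[grid[y][x] for y in range(height-1, -1, -1)] for x in range(width)]
--     elif orientation == "FaceUp":
--         # Mirror horizontally
--         grid = [row[::-1] for row in grid]
--     elif orientation == "FaceDown":
--         # Mirror vertically
--         grid = grid[::-1]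
--
--     # Flatten back to list
--     reoriented = []
--     for row in grid:
--         reoriented.extend(row)
--
--     return reoriented
-- ===== SOURCE B (Python) =====
-- def _reorient_tile_colors(colors, width, height, orientation):
--     """Reorient color array based on tile orientation (flat index arithmetic, no 2D grid)."""
--     if orientation == "RightSideUp":
--         return colors
--     w = width if width > 0 else 0
--     h = height if height > 0 else 0
--     n = w * h
--     if orientation == "UpsideDown":
--         src = lambda k: n - 1 - k
--     elif orientation == "FaceUp":
--         src = lambda k: (k // w) * w + (w - 1 - k % w)
--     elif orientation == "FaceDown":
--         src = lambda k: (h - 1 - k // w) * w + k % w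
--     elif orientation == "RotatedRight":
--         src = lambda k: (h - 1 - k % h) * w + k // h
--     elif orientation == "RotatedLeft":
--         src = lambda k: (k % h) * w + (w - 1 - k // h)
--     else:
--         src = lambda k: k
--     return [colors[src(k)] for k in range(n)]
-- ===== Notes on version B (the rewrite author's own statement) =====
-- stated objective: simpler
-- what changed: B replaces A's build-2D-grid / rotate-grid / flatten pipeline with a single flat map: each output position k is filled directly from colors via a per-orientation source-index formula (div/mod arithmetic), never materialising the intermediate list-of-lists.
import Mathlib
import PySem

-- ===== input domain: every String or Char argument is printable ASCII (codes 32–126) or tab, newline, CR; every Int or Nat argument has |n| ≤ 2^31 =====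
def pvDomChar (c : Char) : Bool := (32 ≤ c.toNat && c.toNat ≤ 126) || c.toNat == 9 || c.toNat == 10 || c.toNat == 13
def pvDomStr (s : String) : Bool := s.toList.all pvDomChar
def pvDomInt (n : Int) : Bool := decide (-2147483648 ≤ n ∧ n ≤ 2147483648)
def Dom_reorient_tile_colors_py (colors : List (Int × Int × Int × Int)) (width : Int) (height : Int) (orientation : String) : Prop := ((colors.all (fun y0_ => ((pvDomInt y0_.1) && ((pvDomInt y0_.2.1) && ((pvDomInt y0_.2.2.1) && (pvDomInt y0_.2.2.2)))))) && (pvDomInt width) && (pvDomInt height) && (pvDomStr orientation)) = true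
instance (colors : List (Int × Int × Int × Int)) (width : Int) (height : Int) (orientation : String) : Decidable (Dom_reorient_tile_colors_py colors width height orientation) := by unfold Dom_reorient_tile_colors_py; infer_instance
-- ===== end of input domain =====

-- B fills the flat output directly with per-orientation index arithmetic instead of A's
-- build-grid / rotate-grid / flatten pipeline (objective: simpler; same O(w*h) cost).

-- default value used by the ports in place of Python's IndexError; Pre_ excludes the raising inputs
def pvZero : Int × Int × Int × Int := (0, 0, 0, 0)

-- ===== PORT A =====
def reorient_tile_colors_py (colors : List (Int × Int × Int × Int)) (width : Int) (height : Int) (orientation : String) : List (Int × Int × Int × Int) :=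
  if orientation = "RightSideUp" then colors
  else
    -- grid built row by row (colors[y*width+x]; out-of-range excluded by Pre_)
    let grid : List (List (Int × Int × Int × Int)) :=
      (PySem.List.pyRange 0 height).foldl (fun g y =>
        g ++ [(PySem.List.pyRange 0 width).foldl (fun row x =>
          row ++ [PySem.List.pyGetD colors (y * width + x) pvZero]) []]) []
    let grid2 : List (List (Int × Int × Int × Int)) :=
      if orientation = "UpsideDown" then
        ((PySem.List.slice? grid none none (-1)).getD []).map
          (fun row => (PySem.List.slice? row none none (-1)).getD [])
      else if orientation = "RotatedLeft" then
        (PySem.List.pyRange (width - 1) (-1) (-1)).map (fun x =>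
          (PySem.List.pyRange 0 height).map (fun y =>
            PySem.List.pyGetD (PySem.List.pyGetD grid y []) x pvZero))
      else if orientation = "RotatedRight" then
        (PySem.List.pyRange 0 width).map (fun x =>
          (PySem.List.pyRange (height - 1) (-1) (-1)).map (fun y =>
            PySem.List.pyGetD (PySem.List.pyGetD grid y []) x pvZero))
      else if orientation = "FaceUp" then
        grid.map (fun row => (PySem.List.slice? row none none (-1)).getD [])
      else if orientation = "FaceDown" then
        (PySem.List.slice? grid none none (-1)).getD []
      else grid
    grid2.foldl (fun acc row => acc ++ row) []

-- ===== PORT B =====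
def reorient_tile_colors_py_alt (colors : List (Int × Int × Int × Int)) (width : Int) (height : Int) (orientation : String) : List (Int × Int × Int × Int) :=
  if orientation = "RightSideUp" then colors
  else
    let w : Int := if width > 0 then width else 0
    let h : Int := if height > 0 then height else 0
    let n : Int := w * h
    let src : Int → Int :=
      if orientation = "UpsideDown" then fun k => n - 1 - k
      else if orientation = "FaceUp" then
        fun k => PySem.Int.floordiv k w * w + (w - 1 - PySem.Int.mod k w)
      else if orientation = "FaceDown" then
        fun k => (h - 1 - PySem.Int.floordiv k w) * w + PySem.Int.mod k w
      else if orientation = "RotatedRight" then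
        fun k => (h - 1 - PySem.Int.mod k h) * w + PySem.Int.floordiv k h
      else if orientation = "RotatedLeft" then
        fun k => PySem.Int.mod k h * w + (w - 1 - PySem.Int.floordiv k h)
      else fun k => k
    (PySem.List.pyRange 0 n).map (fun k => PySem.List.pyGetD colors (src k) pvZero)

-- ===== PRECONDITION & SPEC =====
-- Pre_ excludes exactly the inputs on which the Python A raises IndexError:
-- a non-"RightSideUp" orientation with positive width and height but fewer than width*height colors.
def Pre_reorient_tile_colors_py (colors : List (Int × Int × Int × Int)) (width : Int) (height : Int) (orientation : String) : Prop :=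
  orientation = "RightSideUp" ∨ width ≤ 0 ∨ height ≤ 0 ∨ width * height ≤ colors.length

instance (colors : List (Int × Int × Int × Int)) (width : Int) (height : Int) (orientation : String) : Decidable (Pre_reorient_tile_colors_py colors width height orientation) := by unfold Pre_reorient_tile_colors_py; infer_instance

def pvWitness_reorient_tile_colors_py : (List (Int × Int × Int × Int)) × Int × Int × String :=
  ([(1, 2, 3, 4), (5, 6, 7, 8)], 2, 1, "UpsideDown")

def Spec_reorient_tile_colors_py (colors : List (Int × Int × Int × Int)) (width : Int) (height : Int) (orientation : String) (out : List (Int × Int × Int × Int)) : Prop := out = reorient_tile_colors_py_alt colors width height orientation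
instance (colors : List (Int × Int × Int × Int)) (width : Int) (height : Int) (orientation : String) (out : List (Int × Int × Int × Int)) : Decidable (Spec_reorient_tile_colors_py colors width height orientation out) := by unfold Spec_reorient_tile_colors_py; infer_instance

-- ===== CLAIM (what is proved, stated in full; the proofs are below) =====
def Claim_equal_reorient_tile_colors_py : Prop := ∀ (colors : List (Int × Int × Int × Int)) (width : Int) (height : Int) (orientation : String), Dom_reorient_tile_colors_py colors width height orientation → Pre_reorient_tile_colors_py colors width height orientation → Spec_reorient_tile_colors_py colors width height orientation (reorient_tile_colors_py colors width height orientation)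

-- ===== LEMMAS AND PROOFS =====

-- flattening an H×W grid of generated rows is one map over range (H*W)
theorem pv_flat {α : Type} (H W : Nat) (g : Nat → Nat → α) :
    (List.flatten ((List.range H).map (fun y => (List.range W).map (g y))))
    = (List.range (H * W)).map (fun k => g (k / W) (k % W)) := by
  induction H with
  | zero => simp
  | succ H ih =>
    rw [List.range_succ, List.map_append, List.flatten_append, ih,
      show (H + 1) * W = H * W + W by ring, List.range_add, List.map_append]
    simp only [List.map_cons, List.map_nil, List.flatten_cons, List.flatten_nil,
      List.append_nil, List.map_map]
    congr 1
    apply List.map_congr_left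
    intro j hj
    simp only [List.mem_range] at hj
    have hW : 0 < W := by omega
    have h1 : (H * W + j) / W = H := by
      rw [Nat.add_comm, Nat.add_mul_div_right _ _ hW, Nat.div_eq_of_lt hj]
      omega
    have h2 : (H * W + j) % W = j := by
      rw [Nat.add_comm, Nat.add_mul_mod_self_right, Nat.mod_eq_of_lt hj]
    simp only [Function.comp, h1, h2]

-- reversing a map over range
theorem pv_rev {α : Type} (n : Nat) (g : Nat → α) :
    ((List.range n).map g).reverse = (List.range n).map (fun i => g (n - 1 - i)) := by
  apply List.ext_getElem
  · simp
  · intro i h1 h2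
    simp only [List.length_reverse, List.length_map, List.length_range] at h1
    rw [List.getElem_reverse]
    simp only [List.getElem_map, List.getElem_range, List.length_map, List.length_range]

-- A's grid in canonical form
theorem pv_gridA (colors : List (Int × Int × Int × Int)) (width height : Int) :
    ((PySem.List.pyRange 0 height).foldl (fun g y =>
        g ++ [(PySem.List.pyRange 0 width).foldl (fun row x =>
          row ++ [PySem.List.pyGetD colors (y * width + x) pvZero]) []]) [])
    = (List.range height.toNat).map (fun (y : Nat) => (List.range width.toNat).map
        (fun (x : Nat) => PySem.List.pyGetD colors ((y : Int) * width + (x : Int)) pvZero)) := by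
  rw [PySem.List.pyRange_zero height, PySem.List.pyRange_zero width]
  rw [List.foldl_map, PySem.List.foldl_append_singleton_eq_map, List.nil_append]
  apply List.map_congr_left
  intro y _
  rw [List.foldl_map, PySem.List.foldl_append_singleton_eq_map, List.nil_append]

-- fetching row y of the canonical grid
theorem pv_getG {α : Type} (H : Nat) (rows : Nat → List α) (y : Nat) (hy : y < H) :
    PySem.List.pyGetD ((List.range H).map rows) (y : Int) [] = rows y := by
  rw [PySem.List.pyGetD_natCast]
  exact PySem.List.getD_map_range rows H y [] hy

-- fetching entry x of a canonical row
theorem pv_getRow {α : Type} (W : Nat) (f : Nat → α) (x : Nat) (hx : x < W) (d : α) :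
    PySem.List.pyGetD ((List.range W).map f) (x : Int) d = f x := by
  rw [PySem.List.pyGetD_natCast]
  exact PySem.List.getD_map_range f W x d hx



theorem pv_clamp (z : Int) : (if z > 0 then z else 0) = (z.toNat : Int) := by
  split <;> omega

theorem pv_fold_flat {α : Type} (l : List (List α)) :
    l.foldl (fun acc row => acc ++ row) [] = l.flatten := by
  rw [PySem.List.foldl_append_eq_flatMap (fun row => row) l []]
  simp

theorem pv_case_ud (colors : List (Int × Int × Int × Int)) (width height : Int) :
    reorient_tile_colors_py colors width height "UpsideDown"
    = reorient_tile_colors_py_alt colors width height "UpsideDown" := by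
  unfold reorient_tile_colors_py reorient_tile_colors_py_alt
  simp only [String.reduceEq, reduceIte, pv_clamp]
  rw [pv_gridA]
  simp only [PySem.List.slice?_none_none_neg_one, Option.getD_some]
  rw [pv_rev]
  simp only [List.map_map, Function.comp_def]
  simp only [pv_rev]
  rw [pv_fold_flat, pv_flat]
  rw [show (width.toNat : Int) * (height.toNat : Int) = ((width.toNat * height.toNat : Nat) : Int) by push_cast; ring,
      PySem.List.pyRange_zero_natCast, List.map_map, Nat.mul_comm height.toNat width.toNat]
  apply List.map_congr_left
  intro k hk
  simp only [List.mem_range, Function.comp_def] at hk ⊢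
  have hWH : 0 < width.toNat * height.toNat := lt_of_le_of_lt (Nat.zero_le k) hk
  have hW : 0 < width.toNat := by
    rcases Nat.eq_zero_or_pos width.toNat with h | h
    · rw [h] at hWH; simp at hWH
    · exact h
  generalize hq : k / width.toNat = q
  generalize hr : k % width.toNat = r
  have hml : r < width.toNat := by rw [← hr]; exact Nat.mod_lt _ hW
  have hdl : q < height.toNat := by
    rw [← hq]; exact (Nat.div_lt_iff_lt_mul hW).mpr (by rw [Nat.mul_comm]; exact hk)
  have hqr : width.toNat * q + r = k := by rw [← hq, ← hr]; exact Nat.div_add_mod k width.toNat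
  clear hq hr
  have hidx : ((height.toNat - 1 - q : Nat) : Int) * width
      + ((width.toNat - 1 - r : Nat) : Int)
      = (width.toNat : Int) * (height.toNat : Int) - 1 - (k : Int) := by
    have hwc : width = (width.toNat : Int) := by omega
    have e1 : ((height.toNat - 1 - q : Nat) : Int)
        = (height.toNat : Int) - 1 - (q : Int) := by omega
    have e2 : ((width.toNat - 1 - r : Nat) : Int)
        = (width.toNat : Int) - 1 - (r : Int) := by omega
    have e3 : (k : Int) = (width.toNat : Int) * (q : Int) + (r : Int) := by
      exact_mod_cast hqr.symm
    rw [hwc]; simp only [Int.toNat_natCast]; rw [e1, e2, e3]; ring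
  exact congrArg (fun i => PySem.List.pyGetD colors i pvZero) hidx

theorem pv_case_fu (colors : List (Int × Int × Int × Int)) (width height : Int) :
    reorient_tile_colors_py colors width height "FaceUp"
    = reorient_tile_colors_py_alt colors width height "FaceUp" := by
  unfold reorient_tile_colors_py reorient_tile_colors_py_alt
  simp only [String.reduceEq, reduceIte, pv_clamp]
  rw [pv_gridA]
  simp only [PySem.List.slice?_none_none_neg_one, Option.getD_some]
  simp only [List.map_map, Function.comp_def]
  simp only [pv_rev]
  rw [pv_fold_flat, pv_flat]
  rw [show (width.toNat : Int) * (height.toNat : Int) = ((width.toNat * height.toNat : Nat) : Int) by push_cast; ring,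
      PySem.List.pyRange_zero_natCast, List.map_map, Nat.mul_comm height.toNat width.toNat]
  apply List.map_congr_left
  intro k hk
  simp only [List.mem_range, Function.comp_def] at hk ⊢
  have hWH : 0 < width.toNat * height.toNat := lt_of_le_of_lt (Nat.zero_le k) hk
  have hW : 0 < width.toNat := by
    rcases Nat.eq_zero_or_pos width.toNat with h | h
    · rw [h] at hWH; simp at hWH
    · exact h
  simp only [PySem.Int.floordiv_natCast, PySem.Int.mod_natCast]
  generalize hq : k / width.toNat = q
  generalize hr : k % width.toNat = r
  have hml : r < width.toNat := by rw [← hr]; exact Nat.mod_lt _ hW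
  clear hq hr
  have hidx : ((q : Nat) : Int) * width + ((width.toNat - 1 - r : Nat) : Int)
      = ((q : Nat) : Int) * (width.toNat : Int)
        + ((width.toNat : Int) - 1 - ((r : Nat) : Int)) := by
    have hwc : width = (width.toNat : Int) := by omega
    have e2 : ((width.toNat - 1 - r : Nat) : Int)
        = (width.toNat : Int) - 1 - ((r : Nat) : Int) := by omega
    rw [hwc]; simp only [Int.toNat_natCast]; rw [e2]
  exact congrArg (fun i => PySem.List.pyGetD colors i pvZero) hidx

theorem pv_case_fd (colors : List (Int × Int × Int × Int)) (width height : Int) :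
    reorient_tile_colors_py colors width height "FaceDown"
    = reorient_tile_colors_py_alt colors width height "FaceDown" := by
  unfold reorient_tile_colors_py reorient_tile_colors_py_alt
  simp only [String.reduceEq, reduceIte, pv_clamp]
  rw [pv_gridA]
  simp only [PySem.List.slice?_none_none_neg_one, Option.getD_some]
  rw [pv_rev]
  rw [pv_fold_flat, pv_flat]
  rw [show (width.toNat : Int) * (height.toNat : Int) = ((width.toNat * height.toNat : Nat) : Int) by push_cast; ring,
      PySem.List.pyRange_zero_natCast, List.map_map, Nat.mul_comm height.toNat width.toNat]
  apply List.map_congr_left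
  intro k hk
  simp only [List.mem_range, Function.comp_def] at hk ⊢
  have hWH : 0 < width.toNat * height.toNat := lt_of_le_of_lt (Nat.zero_le k) hk
  have hW : 0 < width.toNat := by
    rcases Nat.eq_zero_or_pos width.toNat with h | h
    · rw [h] at hWH; simp at hWH
    · exact h
  simp only [PySem.Int.floordiv_natCast, PySem.Int.mod_natCast]
  generalize hq : k / width.toNat = q
  generalize hr : k % width.toNat = r
  have hdl : q < height.toNat := by
    rw [← hq]; exact (Nat.div_lt_iff_lt_mul hW).mpr (by rw [Nat.mul_comm]; exact hk)
  clear hq hr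
  have hidx : ((height.toNat - 1 - q : Nat) : Int) * width + ((r : Nat) : Int)
      = ((height.toNat : Int) - 1 - ((q : Nat) : Int)) * (width.toNat : Int)
        + ((r : Nat) : Int) := by
    have hwc : width = (width.toNat : Int) := by omega
    have e1 : ((height.toNat - 1 - q : Nat) : Int)
        = (height.toNat : Int) - 1 - ((q : Nat) : Int) := by omega
    rw [hwc]; simp only [Int.toNat_natCast]; rw [e1]
  exact congrArg (fun i => PySem.List.pyGetD colors i pvZero) hidx

theorem pv_case_rl (colors : List (Int × Int × Int × Int)) (width height : Int) :
    reorient_tile_colors_py colors width height "RotatedLeft"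
    = reorient_tile_colors_py_alt colors width height "RotatedLeft" := by
  unfold reorient_tile_colors_py reorient_tile_colors_py_alt
  simp only [String.reduceEq, reduceIte, pv_clamp]
  rw [pv_gridA]
  rw [PySem.List.pyRange_neg_one (width - 1) (-1), PySem.List.pyRange_zero height]
  rw [show width - 1 - -1 = width from by ring]
  simp only [List.map_map, Function.comp_def]
  rw [pv_fold_flat, pv_flat]
  rw [show (width.toNat : Int) * (height.toNat : Int) = ((width.toNat * height.toNat : Nat) : Int) by push_cast; ring,
      PySem.List.pyRange_zero_natCast, List.map_map]
  apply List.map_congr_left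
  intro k hk
  simp only [List.mem_range, Function.comp_def] at hk ⊢
  have hWH : 0 < width.toNat * height.toNat := lt_of_le_of_lt (Nat.zero_le k) hk
  have hH : 0 < height.toNat := by
    rcases Nat.eq_zero_or_pos height.toNat with h | h
    · rw [h] at hWH; simp at hWH
    · exact h
  simp only [PySem.Int.floordiv_natCast, PySem.Int.mod_natCast]
  generalize hq : k / height.toNat = q
  generalize hr : k % height.toNat = r
  have hyH : r < height.toNat := by rw [← hr]; exact Nat.mod_lt _ hH
  have hjW : q < width.toNat := by rw [← hq]; exact (Nat.div_lt_iff_lt_mul hH).mpr hk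
  clear hq hr
  rw [pv_getG height.toNat _ r hyH]
  rw [show width - 1 - ((q : Nat) : Int)
      = ((width.toNat - 1 - q : Nat) : Int) from by omega]
  rw [pv_getRow width.toNat _ (width.toNat - 1 - q) (by omega) pvZero]
  have hidx : ((r : Nat) : Int) * width + ((width.toNat - 1 - q : Nat) : Int)
      = ((r : Nat) : Int) * (width.toNat : Int)
        + ((width.toNat : Int) - 1 - ((q : Nat) : Int)) := by
    have hwc : width = (width.toNat : Int) := by omega
    have e1 : ((width.toNat - 1 - q : Nat) : Int)
        = (width.toNat : Int) - 1 - ((q : Nat) : Int) := by omega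
    rw [hwc]; simp only [Int.toNat_natCast]; rw [e1]
  exact congrArg (fun i => PySem.List.pyGetD colors i pvZero) hidx

theorem pv_case_rr (colors : List (Int × Int × Int × Int)) (width height : Int) :
    reorient_tile_colors_py colors width height "RotatedRight"
    = reorient_tile_colors_py_alt colors width height "RotatedRight" := by
  unfold reorient_tile_colors_py reorient_tile_colors_py_alt
  simp only [String.reduceEq, reduceIte, pv_clamp]
  rw [pv_gridA]
  rw [PySem.List.pyRange_neg_one (height - 1) (-1), PySem.List.pyRange_zero width]
  rw [show height - 1 - -1 = height from by ring]
  simp only [List.map_map, Function.comp_def]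
  rw [pv_fold_flat, pv_flat]
  rw [show (width.toNat : Int) * (height.toNat : Int) = ((width.toNat * height.toNat : Nat) : Int) by push_cast; ring,
      PySem.List.pyRange_zero_natCast, List.map_map]
  apply List.map_congr_left
  intro k hk
  simp only [List.mem_range, Function.comp_def] at hk ⊢
  have hWH : 0 < width.toNat * height.toNat := lt_of_le_of_lt (Nat.zero_le k) hk
  have hH : 0 < height.toNat := by
    rcases Nat.eq_zero_or_pos height.toNat with h | h
    · rw [h] at hWH; simp at hWH
    · exact h
  simp only [PySem.Int.floordiv_natCast, PySem.Int.mod_natCast]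
  generalize hq : k / height.toNat = q
  generalize hr : k % height.toNat = r
  have hyH : r < height.toNat := by rw [← hr]; exact Nat.mod_lt _ hH
  have hjW : q < width.toNat := by rw [← hq]; exact (Nat.div_lt_iff_lt_mul hH).mpr hk
  clear hq hr
  rw [show height - 1 - ((r : Nat) : Int)
      = ((height.toNat - 1 - r : Nat) : Int) from by omega]
  rw [pv_getG height.toNat _ (height.toNat - 1 - r) (by omega)]
  rw [pv_getRow width.toNat _ q hjW pvZero]
  have hidx : ((height.toNat - 1 - r : Nat) : Int) * width + ((q : Nat) : Int)
      = ((height.toNat : Int) - 1 - ((r : Nat) : Int)) * (width.toNat : Int)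
        + ((q : Nat) : Int) := by
    have hwc : width = (width.toNat : Int) := by omega
    have e1 : ((height.toNat - 1 - r : Nat) : Int)
        = (height.toNat : Int) - 1 - ((r : Nat) : Int) := by omega
    rw [hwc]; simp only [Int.toNat_natCast]; rw [e1]
  exact congrArg (fun i => PySem.List.pyGetD colors i pvZero) hidx

theorem pv_case_def (colors : List (Int × Int × Int × Int)) (width height : Int) (orientation : String)
    (h0 : ¬ orientation = "RightSideUp") (h1 : ¬ orientation = "UpsideDown")
    (h2 : ¬ orientation = "RotatedLeft") (h3 : ¬ orientation = "RotatedRight")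
    (h4 : ¬ orientation = "FaceUp") (h5 : ¬ orientation = "FaceDown") :
    reorient_tile_colors_py colors width height orientation
    = reorient_tile_colors_py_alt colors width height orientation := by
  unfold reorient_tile_colors_py reorient_tile_colors_py_alt
  simp only [if_neg h0, if_neg h1, if_neg h2, if_neg h3, if_neg h4, if_neg h5, pv_clamp]
  rw [pv_gridA]
  rw [pv_fold_flat, pv_flat]
  rw [show (width.toNat : Int) * (height.toNat : Int) = ((width.toNat * height.toNat : Nat) : Int) by push_cast; ring,
      PySem.List.pyRange_zero_natCast, List.map_map, Nat.mul_comm height.toNat width.toNat]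
  apply List.map_congr_left
  intro k hk
  simp only [List.mem_range, Function.comp_def] at hk ⊢
  have hWH : 0 < width.toNat * height.toNat := lt_of_le_of_lt (Nat.zero_le k) hk
  have hW : 0 < width.toNat := by
    rcases Nat.eq_zero_or_pos width.toNat with h | h
    · rw [h] at hWH; simp at hWH
    · exact h
  generalize hq : k / width.toNat = q
  generalize hr : k % width.toNat = r
  have hqr : width.toNat * q + r = k := by rw [← hq, ← hr]; exact Nat.div_add_mod k width.toNat
  clear hq hr
  have hidx : ((q : Nat) : Int) * width + ((r : Nat) : Int) = (k : Int) := by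
    have hwc : width = (width.toNat : Int) := by omega
    have e3 : (k : Int) = (width.toNat : Int) * ((q : Nat) : Int) + ((r : Nat) : Int) := by
      exact_mod_cast hqr.symm
    rw [hwc, e3]; ring
  exact congrArg (fun i => PySem.List.pyGetD colors i pvZero) hidx

theorem pv_eq (colors : List (Int × Int × Int × Int)) (width height : Int) (orientation : String) :
    reorient_tile_colors_py colors width height orientation
    = reorient_tile_colors_py_alt colors width height orientation := by
  by_cases h0 : orientation = "RightSideUp"
  · unfold reorient_tile_colors_py reorient_tile_colors_py_alt
    rw [if_pos h0, if_pos h0]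
  by_cases h1 : orientation = "UpsideDown"
  · subst h1; exact pv_case_ud colors width height
  by_cases h2 : orientation = "RotatedLeft"
  · subst h2; exact pv_case_rl colors width height
  by_cases h3 : orientation = "RotatedRight"
  · subst h3; exact pv_case_rr colors width height
  by_cases h4 : orientation = "FaceUp"
  · subst h4; exact pv_case_fu colors width height
  by_cases h5 : orientation = "FaceDown"
  · subst h5; exact pv_case_fd colors width height
  exact pv_case_def colors width height orientation h0 h1 h2 h3 h4 h5

-- ===== VERDICT (by name: the statement is the Claim_ definition above) =====
theorem reorient_tile_colors_py_spec : Claim_equal_reorient_tile_colors_py := by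
  intro colors width height orientation _ _
  unfold Spec_reorient_tile_colors_py
  exact pv_eq colors width height orientation
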